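-- pv_equiv track=rewrite | github.com/MrBrantCode/unitest_baseline | mut_generate/mist_train_cf/cf_80984/solution.py | sum_of_diagonals
-- ===== SOURCE A (Python) =====
-- def sum_of_diagonals(matrix):
--     f = len(matrix)
--     g = len(matrix[0])
--     h = len(matrix[0][0])
--     diag_dict = {}
--     for z in range(f):
--         for y in range(g):
--             for x in range(h):
--                 if z + y + x not in diag_dict:
--                     diag_dict[z+y+x] = []
--                 diag_dict[z + y + x].append(matrix[z][y][x])
--     return sum(sum(diag_dict[i]) for i in diag_dict.keys())
-- ===== SOURCE B (Python) =====
-- def sum_of_diagonals(matrix):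
--     g = len(matrix[0])
--     h = len(matrix[0][0])
--     return sum(plane[y][x] for plane in matrix for y in range(g) for x in range(h))
-- ===== Notes on version B (the rewrite author's own statement) =====
-- stated objective: simpler
-- what changed: Replaces the dict-of-antidiagonals grouping (a triple index loop filling diag_dict[z+y+x] plus a second pass summing every group) by one flat generator-expression sum over the planes, so the intermediate table, its list appends and the whole second pass disappear.
import Mathlib
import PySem

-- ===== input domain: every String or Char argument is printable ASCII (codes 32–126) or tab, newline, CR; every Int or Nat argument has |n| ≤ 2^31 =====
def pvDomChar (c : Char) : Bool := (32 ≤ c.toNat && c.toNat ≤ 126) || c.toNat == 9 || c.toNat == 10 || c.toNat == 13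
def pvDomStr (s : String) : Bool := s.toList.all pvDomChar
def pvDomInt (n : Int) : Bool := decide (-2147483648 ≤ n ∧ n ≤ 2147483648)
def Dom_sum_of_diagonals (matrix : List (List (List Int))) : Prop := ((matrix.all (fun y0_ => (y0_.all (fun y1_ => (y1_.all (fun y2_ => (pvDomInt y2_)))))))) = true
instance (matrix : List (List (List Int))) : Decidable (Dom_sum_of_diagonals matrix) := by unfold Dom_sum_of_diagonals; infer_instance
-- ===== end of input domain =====

-- B replaces A's dict-of-antidiagonals grouping (triple index loop + second summing pass)
-- by one flat generator sum over the planes; equal on all inputs where A returns (Pre_ below).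

-- ===== PORT A =====
def sum_of_diagonals (matrix : List (List (List Int))) : Int :=
  let f : Int := matrix.length
  let g : Int := (PySem.List.pyGetD matrix 0 []).length
  let h : Int := (PySem.List.pyGetD (PySem.List.pyGetD matrix 0 []) 0 []).length
  let diag :=
    (PySem.List.pyRange 0 f 1).foldl (fun d z =>
      (PySem.List.pyRange 0 g 1).foldl (fun d y =>
        (PySem.List.pyRange 0 h 1).foldl (fun d x =>
          let d := if d.contains (z + y + x) then d else d.insert (z + y + x) ([] : List Int)
          d.modify (z + y + x) [] (fun l =>
            l ++ [PySem.List.pyGetD (PySem.List.pyGetD (PySem.List.pyGetD matrix z []) y []) x 0]))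
          d) d)
      (PySem.Dict.empty : PySem.Dict Int (List Int))
  (diag.keys.map (fun i => (diag.getD i []).sum)).sum

-- ===== PORT B =====
def sum_of_diagonals_alt (matrix : List (List (List Int))) : Int :=
  let g : Int := (PySem.List.pyGetD matrix 0 []).length
  let h : Int := (PySem.List.pyGetD (PySem.List.pyGetD matrix 0 []) 0 []).length
  (matrix.map (fun plane =>
    ((PySem.List.pyRange 0 g 1).map (fun y =>
      ((PySem.List.pyRange 0 h 1).map (fun x =>
        PySem.List.pyGetD (PySem.List.pyGetD plane y []) x 0)).sum)).sum)).sum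

-- ===== PRECONDITION & SPEC =====
-- Pre_ = exactly where Python A returns: a nonempty matrix with nonempty matrix[0], and —
-- unless matrix[0][0] is empty, in which case the loop body never runs — every plane at least
-- as long as matrix[0] and every indexed row at least as long as matrix[0][0]
-- (otherwise A raises IndexError).
def Pre_sum_of_diagonals (matrix : List (List (List Int))) : Prop :=
  matrix ≠ [] ∧ matrix.getD 0 [] ≠ [] ∧
  (((matrix.getD 0 []).getD 0 []).length = 0 ∨
    ∀ plane ∈ matrix, (matrix.getD 0 []).length ≤ plane.length ∧
      ∀ row ∈ plane.take (matrix.getD 0 []).length,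
        ((matrix.getD 0 []).getD 0 []).length ≤ row.length)
instance (matrix : List (List (List Int))) : Decidable (Pre_sum_of_diagonals matrix) := by
  unfold Pre_sum_of_diagonals; infer_instance
def pvWitness_sum_of_diagonals : List (List (List Int)) :=
  ([[[1, 2], [3, 4]], [[5, 6], [7, 8]]])
def Spec_sum_of_diagonals (matrix : List (List (List Int))) (out : Int) : Prop := out = sum_of_diagonals_alt matrix
instance (matrix : List (List (List Int))) (out : Int) : Decidable (Spec_sum_of_diagonals matrix out) := by unfold Spec_sum_of_diagonals; infer_instance

-- ===== CLAIM (what is proved, stated in full; the proofs are below) =====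
def Claim_equal_sum_of_diagonals : Prop := ∀ (matrix : List (List (List Int))), Dom_sum_of_diagonals matrix → Pre_sum_of_diagonals matrix → Spec_sum_of_diagonals matrix (sum_of_diagonals matrix)

-- ===== LEMMAS AND PROOFS =====

/-- Total of all grouped values in A's dict: the sum over its keys of the group sums. -/
def dictSum (d : PySem.Dict Int (List Int)) : Int :=
  (d.keys.map (fun i => (d.getD i []).sum)).sum

/-- Bumping the image of one key of a Nodup list by `c` bumps the mapped sum by `c`. -/
lemma sum_map_if_add (l : List Int) (k c : Int) (f : Int → Int)
    (hnd : l.Nodup) (hk : k ∈ l) :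
    (l.map (fun i => if i = k then f i + c else f i)).sum = (l.map f).sum + c := by
  induction l with
  | nil => cases hk
  | cons a l ih =>
    have hnd' := List.nodup_cons.mp hnd
    by_cases hak : a = k
    · subst hak
      have hcong : ∀ i ∈ l, (if i = a then f i + c else f i) = f i := by
        intro i hi
        have hia : ¬ i = a := by rintro rfl; exact hnd'.1 hi
        simp [hia]
      rw [List.map_cons, List.map_congr_left hcong]
      simp
      ring
    · have hk' : k ∈ l := by
        rcases List.mem_cons.mp hk with h | h
        · exact absurd h.symm hak
        · exact h
      simp only [List.map_cons, List.sum_cons, if_neg hak, ih hnd'.2 hk']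
      ring

/-- One body execution of A's inner loop adds the appended value to `dictSum`. -/
lemma dictSum_step (d : PySem.Dict Int (List Int)) (k v : Int) (hnd : d.keys.Nodup) :
    dictSum ((if d.contains k then d else d.insert k []).modify k []
        (fun l => l ++ [v])) = dictSum d + v := by
  by_cases hc : d.contains k = true
  · rw [if_pos hc]
    have hkeys : ((d.modify k [] (fun l => l ++ [v]))).keys = d.keys := by
      rw [PySem.Dict.keys_modify, PySem.Dict.keys_insert_of_contains _ _ hc]
    have hmem : k ∈ d.keys := (PySem.Dict.contains_iff_mem_keys d k).mp hc
    unfold dictSum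
    rw [hkeys]
    have hcong : ∀ i ∈ d.keys,
        ((d.modify k [] (fun l => l ++ [v])).getD i []).sum
          = (fun i => if i = k then (d.getD i []).sum + v else (d.getD i []).sum) i := by
      intro i _
      rw [PySem.Dict.getD_modify]
      by_cases hik : i = k <;> simp [hik]
    rw [List.map_congr_left hcong, sum_map_if_add _ _ _ _ hnd hmem]
  · have hc' : d.contains k = false := by simpa using hc
    rw [if_neg hc]
    have hnotmem : k ∉ d.keys := fun hm =>
      hc ((PySem.Dict.contains_iff_mem_keys d k).mpr hm)
    have hkeys : (((d.insert k []).modify k [] (fun l => l ++ [v]))).keys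
        = d.keys ++ [k] := by
      rw [PySem.Dict.keys_modify, PySem.Dict.keys_insert_of_contains,
        PySem.Dict.keys_insert_of_not_contains _ _ hc']
      exact PySem.Dict.contains_insert_self d k []
    unfold dictSum
    rw [hkeys]
    have hcong : ∀ i ∈ d.keys,
        (((d.insert k []).modify k [] (fun l => l ++ [v])).getD i []).sum
          = (d.getD i []).sum := by
      intro i hi
      have hik : i ≠ k := fun e => hnotmem (e ▸ hi)
      rw [PySem.Dict.getD_modify]
      simp [hik, PySem.Dict.getD_insert]
    rw [List.map_append, List.sum_append, List.map_congr_left hcong]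
    rw [List.map_singleton, List.sum_singleton, PySem.Dict.getD_modify]
    simp

/-- One body execution of A's inner loop keeps the key list Nodup. -/
lemma nodup_step (d : PySem.Dict Int (List Int)) (k v : Int) (hnd : d.keys.Nodup) :
    ((if d.contains k then d else d.insert k []).modify k []
        (fun l => l ++ [v])).keys.Nodup := by
  by_cases hc : d.contains k = true
  · rw [if_pos hc, PySem.Dict.keys_modify, PySem.Dict.keys_insert_of_contains _ _ hc]
    exact hnd
  · have hc' : d.contains k = false := by simpa using hc
    have hnotmem : k ∉ d.keys := fun hm =>
      hc ((PySem.Dict.contains_iff_mem_keys d k).mpr hm)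
    rw [if_neg hc, PySem.Dict.keys_modify,
      PySem.Dict.keys_insert_of_contains _ _ (PySem.Dict.contains_insert_self d k []),
      PySem.Dict.keys_insert_of_not_contains _ _ hc']
    simp [List.nodup_append, hnd]
    intro a ha e
    exact hnotmem (e ▸ ha)

/-- A fold whose every step adds `v a` to `dictSum` (and keeps keys Nodup) adds the mapped sum. -/
lemma foldl_dictSum {α : Type} (step : PySem.Dict Int (List Int) → α → PySem.Dict Int (List Int))
    (v : α → Int)
    (hN : ∀ d a, d.keys.Nodup → (step d a).keys.Nodup)
    (hS : ∀ d a, d.keys.Nodup → dictSum (step d a) = dictSum d + v a) :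
    ∀ (l : List α) (d : PySem.Dict Int (List Int)), d.keys.Nodup →
      (l.foldl step d).keys.Nodup ∧ dictSum (l.foldl step d) = dictSum d + (l.map v).sum := by
  intro l
  induction l with
  | nil => intro d hd; simpa using hd
  | cons a l ih =>
    intro d hd
    obtain ⟨h1, h2⟩ := ih (step d a) (hN d a hd)
    refine ⟨h1, ?_⟩
    rw [List.foldl_cons] at *
    rw [h2, hS d a hd]
    simp
    ring

/-- Index loop over a prefix is a map over the taken prefix. -/
lemma map_range_getD {α β : Type} (f : α → β) (xs : List α) (d : α) (n : Nat)
    (hle : n ≤ xs.length) :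
    (List.range n).map (fun k => f (xs.getD k d)) = (xs.take n).map f := by
  apply List.ext_getElem
  · simp [Nat.min_eq_left hle]
  · intro i h1 h2
    have hi : i < n := by simpa using h1
    have hix : i < xs.length := lt_of_lt_of_le hi hle
    simp [List.getElem?_eq_getElem hix, List.getElem_take]

/-- pyRange form of `map_range_getD`. -/
lemma map_pyRange_getD {α β : Type} (f : α → β) (xs : List α) (d : α) (n : Nat)
    (hle : n ≤ xs.length) :
    (PySem.List.pyRange 0 (n : Int) 1).map (fun k => f (PySem.List.pyGetD xs k d))
      = (xs.take n).map f := by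
  rw [PySem.List.pyRange_zero_nat, List.map_map]
  have hcomp : ((fun k => f (PySem.List.pyGetD xs k d)) ∘ fun (k : Nat) => (k : Int))
      = fun k : Nat => f (xs.getD k d) := by
    funext k; simp [PySem.List.pyGetD_natCast]
  rw [hcomp, map_range_getD f xs d n hle]

/-- A's whole dict-building triple loop, measured by `dictSum`, is the plain triple sum. -/
lemma A_dict_eval (val : Int → Int → Int → Int) (f g h : Int) :
    dictSum ((PySem.List.pyRange 0 f 1).foldl (fun d z =>
      (PySem.List.pyRange 0 g 1).foldl (fun d y =>
        (PySem.List.pyRange 0 h 1).foldl (fun d x =>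
          (if d.contains (z + y + x) then d else d.insert (z + y + x) ([] : List Int)).modify
            (z + y + x) [] (fun l => l ++ [val z y x]))
          d) d)
      (PySem.Dict.empty : PySem.Dict Int (List Int)))
    = ((PySem.List.pyRange 0 f 1).map (fun z =>
        ((PySem.List.pyRange 0 g 1).map (fun y =>
          ((PySem.List.pyRange 0 h 1).map (fun x => val z y x)).sum)).sum)).sum := by
  have hinner : ∀ z y (d : PySem.Dict Int (List Int)), d.keys.Nodup →
      ((PySem.List.pyRange 0 h 1).foldl (fun d x =>
          (if d.contains (z + y + x) then d else d.insert (z + y + x) ([] : List Int)).modify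
            (z + y + x) [] (fun l => l ++ [val z y x])) d).keys.Nodup ∧
      dictSum ((PySem.List.pyRange 0 h 1).foldl (fun d x =>
          (if d.contains (z + y + x) then d else d.insert (z + y + x) ([] : List Int)).modify
            (z + y + x) [] (fun l => l ++ [val z y x])) d)
        = dictSum d + ((PySem.List.pyRange 0 h 1).map (fun x => val z y x)).sum := by
    intro z y d hd
    exact foldl_dictSum _ (fun x => val z y x)
      (fun d x hd => nodup_step d (z + y + x) (val z y x) hd)
      (fun d x hd => dictSum_step d (z + y + x) (val z y x) hd)
      (PySem.List.pyRange 0 h 1) d hd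
  have hmid : ∀ z (d : PySem.Dict Int (List Int)), d.keys.Nodup →
      ((PySem.List.pyRange 0 g 1).foldl (fun d y =>
        (PySem.List.pyRange 0 h 1).foldl (fun d x =>
          (if d.contains (z + y + x) then d else d.insert (z + y + x) ([] : List Int)).modify
            (z + y + x) [] (fun l => l ++ [val z y x])) d) d).keys.Nodup ∧
      dictSum ((PySem.List.pyRange 0 g 1).foldl (fun d y =>
        (PySem.List.pyRange 0 h 1).foldl (fun d x =>
          (if d.contains (z + y + x) then d else d.insert (z + y + x) ([] : List Int)).modify
            (z + y + x) [] (fun l => l ++ [val z y x])) d) d)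
        = dictSum d + ((PySem.List.pyRange 0 g 1).map (fun y =>
            ((PySem.List.pyRange 0 h 1).map (fun x => val z y x)).sum)).sum := by
    intro z d hd
    exact foldl_dictSum _ _
      (fun d y hd => (hinner z y d hd).1)
      (fun d y hd => (hinner z y d hd).2)
      (PySem.List.pyRange 0 g 1) d hd
  have houter := foldl_dictSum _ _
      (fun d z hd => (hmid z d hd).1)
      (fun d z hd => (hmid z d hd).2)
      (PySem.List.pyRange 0 f 1) (PySem.Dict.empty : PySem.Dict Int (List Int))
      (by simp [PySem.Dict.keys_empty])
  rw [houter.2]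
  simp [dictSum, PySem.Dict.keys_empty]

-- ===== VERDICT (by name: the statement is the Claim_ definition above) =====
theorem sum_of_diagonals_spec : Claim_equal_sum_of_diagonals := by
  intro matrix _ _
  unfold Spec_sum_of_diagonals sum_of_diagonals sum_of_diagonals_alt
  simp only [PySem.List.pyGetD_zero]
  have hA := A_dict_eval
      (fun z y x => PySem.List.pyGetD (PySem.List.pyGetD (PySem.List.pyGetD matrix z []) y []) x 0)
      (matrix.length : Int) ((matrix.getD 0 []).length : Int)
      (((matrix.getD 0 []).getD 0 []).length : Int)
  unfold dictSum at hA
  rw [hA]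
  rw [map_pyRange_getD
      (fun plane => ((PySem.List.pyRange 0 ((matrix.getD 0 []).length : Int) 1).map (fun y =>
        ((PySem.List.pyRange 0 (((matrix.getD 0 []).getD 0 []).length : Int) 1).map (fun x =>
          PySem.List.pyGetD (PySem.List.pyGetD plane y []) x 0)).sum)).sum)
      matrix [] matrix.length le_rfl]
  rw [List.take_length]
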